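-- pv_equiv track=rewrite | github.com/KKosukeee/CodingQuestions | LeetCode/5297_jump_game_III.py | dfs
-- ===== SOURCE A (Python) =====
-- from typing import List
--
-- def dfs(arr: List[int], start: int) -> bool:
--   """
--   A DFS solution that runs in O(N) in time and O(N) in space
--
--   Args:
--     arr:
--     start:
--
--   Returns:
--
--   """
--   visited = set()
--
--   def dfs(i):
--     if not i < len(arr):
--       return False
--     if arr[i] == 0:
--       return True
--     can_reach = False
--     if 0 <= i + arr[i] < len(arr) and i + arr[i] not in visited:
--       visited.add(i + arr[i])
--       can_reach |= dfs(i + arr[i])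
--     if 0 <= i - arr[i] < len(arr) and i - arr[i] not in visited:
--       visited.add(i - arr[i])
--       can_reach |= dfs(i - arr[i])
--     return can_reach
--
--   return dfs(start)
-- ===== SOURCE B (Python) =====
-- def dfs(arr, start):
--   """Iterative worklist search: same answer as the recursive solution, O(N) time/space."""
--   if not start < len(arr):
--     return False
--   visited = set()
--   stack = [start]
--   while stack:
--     i = stack.pop()
--     v = arr[i]
--     if v == 0:
--       return True
--     for nb in (i + v, i - v):
--       if 0 <= nb < len(arr) and nb not in visited:
--         visited.add(nb)
--         stack.append(nb)
--   return False
-- ===== Notes on version B (the rewrite author's own statement) =====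
-- stated objective: alternative
-- what changed: Replaces the recursive closure-based DFS (nested function threading a visited set, accumulating can_reach |= over both branches) with an iterative explicit-stack worklist search that returns True as soon as a zero is popped; same O(N) visited-set discipline, no recursion.
import Mathlib
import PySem

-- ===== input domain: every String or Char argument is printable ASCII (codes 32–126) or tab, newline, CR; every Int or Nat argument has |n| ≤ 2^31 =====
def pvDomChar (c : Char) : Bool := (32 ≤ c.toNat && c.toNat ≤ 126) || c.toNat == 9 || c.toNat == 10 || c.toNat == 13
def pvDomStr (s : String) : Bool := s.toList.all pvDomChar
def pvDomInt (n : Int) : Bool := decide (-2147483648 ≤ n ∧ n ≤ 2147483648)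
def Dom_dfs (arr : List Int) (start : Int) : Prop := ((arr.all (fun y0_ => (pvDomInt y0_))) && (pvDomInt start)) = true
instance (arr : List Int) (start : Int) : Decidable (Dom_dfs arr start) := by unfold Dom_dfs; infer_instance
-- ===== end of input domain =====

-- B replaces A's recursive visited-set DFS by an iterative explicit-stack worklist search
-- with early return on a zero (objective: alternative decomposition, same O(N) cost).

-- ===== PORT A =====
-- A's inner recursive `dfs(i)` threads the mutable set `visited`; ported with an explicit
-- fuel argument (arr.length + 1 bounds the recursion depth: every nested call is preceded
-- by adding a fresh in-range index to `visited`).  arr[i] is ported as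
-- (PySem.List.pyGet? arr i).getD 0: exact wherever Python does not raise (Pre_ below
-- excludes the raising inputs start < -len(arr)).
def dfsGoA (arr : List Int) : Nat → PySem.Set Int → Int → Bool × PySem.Set Int
  | 0, visited, _ => (false, visited)  -- fuel never runs out for fuel > pvFree arr visited
  | fuel+1, visited, i =>
    if ¬ i < (arr.length : Int) then (false, visited)
    else
      let ai := (PySem.List.pyGet? arr i).getD 0
      if ai = 0 then (true, visited)
      else
        -- can_reach |= dfs(i + arr[i]) after marking, guarded; then the same for i - arr[i]
        let s1 := if 0 ≤ i + ai ∧ i + ai < (arr.length : Int) ∧ ¬ (i + ai) ∈ visited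
                  then dfsGoA arr fuel (PySem.Set.add visited (i + ai)) (i + ai)
                  else (false, visited)
        let s2 := if 0 ≤ i - ai ∧ i - ai < (arr.length : Int) ∧ ¬ (i - ai) ∈ s1.2
                  then dfsGoA arr fuel (PySem.Set.add s1.2 (i - ai)) (i - ai)
                  else (false, s1.2)
        (s1.1 || s2.1, s2.2)

def dfs (arr : List Int) (start : Int) : Bool :=
  (dfsGoA arr (arr.length + 1) PySem.Set.empty start).1

-- ===== PORT B =====
-- Helper facts for the termination measure of the worklist loop below.
theorem pvFilterLe {α : Type} (p q : α → Bool) (h : ∀ a, q a = true → p a = true) :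
    ∀ l : List α, (l.filter q).length ≤ (l.filter p).length := by
  intro l
  induction l with
  | nil => simp
  | cons a l ih =>
    by_cases hq : q a = true
    · have hp := h a hq
      simp only [List.filter_cons, hq, hp, if_pos, List.length_cons]
      omega
    · simp only [List.filter_cons]
      cases hpa : p a <;> simp only [Bool.false_eq_true, hq,
        reduceIte, List.length_cons] <;> omega

theorem pvFilterLt {α : Type} (p q : α → Bool) (h : ∀ a, q a = true → p a = true)
    (x : α) (hp : p x = true) (hq : q x = false) :
    ∀ l : List α, x ∈ l → (l.filter q).length < (l.filter p).length := by
  intro l hx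
  induction l with
  | nil => simp at hx
  | cons a l ih =>
    rcases List.mem_cons.1 hx with rfl | hxl
    · simp only [List.filter_cons, hp, hq, if_pos, Bool.false_eq_true, reduceIte,
        List.length_cons]
      have := pvFilterLe p q h l
      omega
    · have := ih hxl
      by_cases hqa : q a = true
      · have hpa := h a hqa
        simp only [List.filter_cons, hqa, hpa, if_pos, List.length_cons]; omega
      · simp only [List.filter_cons]
        cases hpa : p a <;> simp only [Bool.false_eq_true, reduceIte, hqa,
          List.length_cons] <;> omega

-- pvFree arr v = number of in-range indices not yet in the visited set (termination measure).
def pvFree (arr : List Int) (v : PySem.Set Int) : Nat :=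
  ((List.range arr.length).filter (fun (j : Nat) => !decide ((j : Int) ∈ v))).length

theorem pvFree_add_lt (arr : List Int) (v : PySem.Set Int) (x : Int)
    (h0 : 0 ≤ x) (h1 : x < (arr.length : Int)) (h2 : ¬ x ∈ v) :
    pvFree arr (PySem.Set.add v x) < pvFree arr v := by
  unfold pvFree
  refine pvFilterLt _ _ ?_ x.toNat ?_ ?_ _ ?_
  · intro a ha
    simp only [Bool.not_eq_eq_eq_not, Bool.not_true, decide_eq_false_iff_not,
      PySem.Set.mem_add] at *
    exact fun hav => ha (Or.inl hav)
  · simpa [Int.toNat_of_nonneg h0] using h2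
  · simp [PySem.Set.mem_add, Int.toNat_of_nonneg h0]
  · simpa using (by omega : x.toNat < arr.length)

-- The Python while-loop over the stack (top of stack = head of list; pushing n1 then n2
-- leaves n2 on top, hence the cons order below).  The for-loop over the two neighbour
-- candidates is unrolled into the four guard combinations.
def dfsGoB (arr : List Int) (visited : PySem.Set Int) (stack : List Int) : Bool :=
  match stack with
  | [] => false
  | i :: rest =>
    if (PySem.List.pyGet? arr i).getD 0 = 0 then true
    else
      if h1 : 0 ≤ i + (PySem.List.pyGet? arr i).getD 0 ∧
          i + (PySem.List.pyGet? arr i).getD 0 < (arr.length : Int) ∧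
          ¬ (i + (PySem.List.pyGet? arr i).getD 0) ∈ visited then
        if h2 : 0 ≤ i - (PySem.List.pyGet? arr i).getD 0 ∧
            i - (PySem.List.pyGet? arr i).getD 0 < (arr.length : Int) ∧
            ¬ (i - (PySem.List.pyGet? arr i).getD 0) ∈
              PySem.Set.add visited (i + (PySem.List.pyGet? arr i).getD 0) then
          dfsGoB arr
            (PySem.Set.add (PySem.Set.add visited (i + (PySem.List.pyGet? arr i).getD 0))
              (i - (PySem.List.pyGet? arr i).getD 0))
            ((i - (PySem.List.pyGet? arr i).getD 0) :: (i + (PySem.List.pyGet? arr i).getD 0) :: rest)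
        else dfsGoB arr (PySem.Set.add visited (i + (PySem.List.pyGet? arr i).getD 0))
          ((i + (PySem.List.pyGet? arr i).getD 0) :: rest)
      else
        if h2 : 0 ≤ i - (PySem.List.pyGet? arr i).getD 0 ∧
            i - (PySem.List.pyGet? arr i).getD 0 < (arr.length : Int) ∧
            ¬ (i - (PySem.List.pyGet? arr i).getD 0) ∈ visited then
          dfsGoB arr (PySem.Set.add visited (i - (PySem.List.pyGet? arr i).getD 0))
            ((i - (PySem.List.pyGet? arr i).getD 0) :: rest)
        else dfsGoB arr visited rest
termination_by 3 * pvFree arr visited + stack.length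
decreasing_by
  · have ha := pvFree_add_lt arr visited _ h1.1 h1.2.1 h1.2.2
    have hb := pvFree_add_lt arr (PySem.Set.add visited (i + (PySem.List.pyGet? arr i).getD 0)) _ h2.1 h2.2.1 h2.2.2
    simp only [List.length_cons]; omega
  · have ha := pvFree_add_lt arr visited _ h1.1 h1.2.1 h1.2.2
    simp only [List.length_cons]; omega
  · have ha := pvFree_add_lt arr visited _ h2.1 h2.2.1 h2.2.2
    simp only [List.length_cons]; omega
  · simp only [List.length_cons]; omega

def dfs_alt (arr : List Int) (start : Int) : Bool :=
  if ¬ start < (arr.length : Int) then false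
  else dfsGoB arr PySem.Set.empty [start]

-- ===== PRECONDITION & SPEC =====
-- Pre_ excludes exactly start < -len(arr): there Python A raises IndexError on arr[start]
-- (and Python B raises the same); on every other input A returns normally.
def Pre_dfs (arr : List Int) (start : Int) : Prop :=
  -(arr.length : Int) ≤ start ∨ (arr.length : Int) ≤ start
instance (arr : List Int) (start : Int) : Decidable (Pre_dfs arr start) := by
  unfold Pre_dfs; infer_instance

def pvWitness_dfs : List Int × Int := ([1, 2, 0], 0)

def Spec_dfs (arr : List Int) (start : Int) (out : Bool) : Prop := out = dfs_alt arr start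
instance (arr : List Int) (start : Int) (out : Bool) : Decidable (Spec_dfs arr start out) := by
  unfold Spec_dfs; infer_instance

-- ===== CLAIM (what is proved, stated in full; the proofs are below) =====
def Claim_equal_dfs : Prop := ∀ (arr : List Int) (start : Int), Dom_dfs arr start → Pre_dfs arr start → Spec_dfs arr start (dfs arr start)

-- ===== LEMMAS AND PROOFS =====

-- arr[i] as both ports read it
def pvVal (arr : List Int) (i : Int) : Int := (PySem.List.pyGet? arr i).getD 0

-- m is an in-range neighbour of i
def pvAdj (arr : List Int) (i m : Int) : Prop :=
  (0 ≤ m ∧ m < (arr.length : Int)) ∧ (m = i + pvVal arr i ∨ m = i - pvVal arr i)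

-- one expansion step of the search graph
def pvStep (arr : List Int) (i m : Int) : Prop := pvVal arr i ≠ 0 ∧ pvAdj arr i m

theorem pvFree_le_of_subset (arr : List Int) {v w : PySem.Set Int}
    (h : ∀ x ∈ v, x ∈ w) : pvFree arr w ≤ pvFree arr v := by
  apply pvFilterLe
  intro a ha
  simp only [Bool.not_eq_eq_eq_not, Bool.not_true, decide_eq_false_iff_not] at *
  exact fun hav => ha (h _ hav)

theorem pvFree_empty (arr : List Int) : pvFree arr PySem.Set.empty = arr.length := by
  simp [pvFree, PySem.Set.empty]

theorem dfsGoA_mono (arr : List Int) (fuel : Nat) :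
    ∀ (v : PySem.Set Int) (i : Int), ∀ x ∈ v, x ∈ (dfsGoA arr fuel v i).2 := by
  induction fuel with
  | zero => intro v i x hx; simpa [dfsGoA] using hx
  | succ fuel ih =>
    intro v i x hx
    simp only [dfsGoA]
    by_cases hin : ¬ i < (arr.length : Int)
    · rw [if_pos hin]; exact hx
    · rw [if_neg hin]
      by_cases hz : (PySem.List.pyGet? arr i).getD 0 = 0
      · rw [if_pos hz]; exact hx
      · rw [if_neg hz]
        by_cases hg1 : 0 ≤ i + (PySem.List.pyGet? arr i).getD 0 ∧
            i + (PySem.List.pyGet? arr i).getD 0 < (arr.length : Int) ∧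
            ¬ (i + (PySem.List.pyGet? arr i).getD 0) ∈ v
        · rw [if_pos hg1]
          have hx1 : x ∈ (dfsGoA arr fuel
              (PySem.Set.add v (i + (PySem.List.pyGet? arr i).getD 0))
              (i + (PySem.List.pyGet? arr i).getD 0)).2 :=
            ih _ _ x (by simp [PySem.Set.mem_add, hx])
          by_cases hg2 : 0 ≤ i - (PySem.List.pyGet? arr i).getD 0 ∧
              i - (PySem.List.pyGet? arr i).getD 0 < (arr.length : Int) ∧
              ¬ (i - (PySem.List.pyGet? arr i).getD 0) ∈ (dfsGoA arr fuel
                (PySem.Set.add v (i + (PySem.List.pyGet? arr i).getD 0))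
                (i + (PySem.List.pyGet? arr i).getD 0)).2
          · rw [if_pos hg2]
            exact ih _ _ x (by simp [PySem.Set.mem_add, hx1])
          · rw [if_neg hg2]; exact hx1
        · rw [if_neg hg1]
          by_cases hg2 : 0 ≤ i - (PySem.List.pyGet? arr i).getD 0 ∧
              i - (PySem.List.pyGet? arr i).getD 0 < (arr.length : Int) ∧
              ¬ (i - (PySem.List.pyGet? arr i).getD 0) ∈ v
          · rw [if_pos hg2]
            exact ih _ _ x (by simp [PySem.Set.mem_add, hx])
          · rw [if_neg hg2]; exact hx

theorem dfsGoA_sound (arr : List Int) (fuel : Nat) :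
    ∀ (v : PySem.Set Int) (i : Int), (dfsGoA arr fuel v i).1 = true →
      ∃ j, Relation.ReflTransGen (pvStep arr) i j ∧ pvVal arr j = 0 := by
  induction fuel with
  | zero => intro v i h; simp [dfsGoA] at h
  | succ fuel ih =>
    intro v i h
    simp only [dfsGoA] at h
    by_cases hin : ¬ i < (arr.length : Int)
    · rw [if_pos hin] at h; simp at h
    · rw [if_neg hin] at h
      by_cases hz : (PySem.List.pyGet? arr i).getD 0 = 0
      · exact ⟨i, Relation.ReflTransGen.refl, hz⟩
      · rw [if_neg hz] at h
        by_cases hg1 : 0 ≤ i + (PySem.List.pyGet? arr i).getD 0 ∧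
            i + (PySem.List.pyGet? arr i).getD 0 < (arr.length : Int) ∧
            ¬ (i + (PySem.List.pyGet? arr i).getD 0) ∈ v
        · rw [if_pos hg1] at h
          by_cases hg2 : 0 ≤ i - (PySem.List.pyGet? arr i).getD 0 ∧
              i - (PySem.List.pyGet? arr i).getD 0 < (arr.length : Int) ∧
              ¬ (i - (PySem.List.pyGet? arr i).getD 0) ∈ (dfsGoA arr fuel
                (PySem.Set.add v (i + (PySem.List.pyGet? arr i).getD 0))
                (i + (PySem.List.pyGet? arr i).getD 0)).2
          · rw [if_pos hg2] at h
            rcases (Bool.or_eq_true _ _).mp h with h1 | h2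
            · rcases ih _ _ h1 with ⟨j, hj, hj0⟩
              exact ⟨j, Relation.ReflTransGen.head
                ⟨hz, ⟨⟨hg1.1, hg1.2.1⟩, Or.inl rfl⟩⟩ hj, hj0⟩
            · rcases ih _ _ h2 with ⟨j, hj, hj0⟩
              exact ⟨j, Relation.ReflTransGen.head
                ⟨hz, ⟨⟨hg2.1, hg2.2.1⟩, Or.inr rfl⟩⟩ hj, hj0⟩
          · rw [if_neg hg2] at h
            simp only [Bool.or_false] at h
            rcases ih _ _ h with ⟨j, hj, hj0⟩
            exact ⟨j, Relation.ReflTransGen.head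
              ⟨hz, ⟨⟨hg1.1, hg1.2.1⟩, Or.inl rfl⟩⟩ hj, hj0⟩
        · rw [if_neg hg1] at h
          by_cases hg2 : 0 ≤ i - (PySem.List.pyGet? arr i).getD 0 ∧
              i - (PySem.List.pyGet? arr i).getD 0 < (arr.length : Int) ∧
              ¬ (i - (PySem.List.pyGet? arr i).getD 0) ∈ v
          · rw [if_pos hg2] at h
            simp only [Bool.false_or] at h
            rcases ih _ _ h with ⟨j, hj, hj0⟩
            exact ⟨j, Relation.ReflTransGen.head
              ⟨hz, ⟨⟨hg2.1, hg2.2.1⟩, Or.inr rfl⟩⟩ hj, hj0⟩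
          · rw [if_neg hg2] at h; simp at h

theorem dfsGoA_inv (arr : List Int) (fuel : Nat) :
    ∀ (v : PySem.Set Int) (i : Int), pvFree arr v < fuel → i < (arr.length : Int) →
      (dfsGoA arr fuel v i).1 = false →
      ∀ k, (k = i ∨ (k ∈ (dfsGoA arr fuel v i).2 ∧ ¬ k ∈ v)) →
        pvVal arr k ≠ 0 ∧ ∀ m, pvAdj arr k m → m ∈ (dfsGoA arr fuel v i).2 := by
  induction fuel with
  | zero => intro v i hfu; omega
  | succ fuel ih =>
    intro v i hfu hin hres k hk
    simp only [dfsGoA] at hres hk ⊢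
    rw [if_neg (not_not_intro hin)] at hres hk ⊢
    by_cases hz : (PySem.List.pyGet? arr i).getD 0 = 0
    · rw [if_pos hz] at hres; simp at hres
    · rw [if_neg hz] at hres hk ⊢
      by_cases hg1 : 0 ≤ i + (PySem.List.pyGet? arr i).getD 0 ∧
          i + (PySem.List.pyGet? arr i).getD 0 < (arr.length : Int) ∧
          ¬ (i + (PySem.List.pyGet? arr i).getD 0) ∈ v
      · rw [if_pos hg1] at hres hk ⊢
        have hf1 : pvFree arr (PySem.Set.add v (i + (PySem.List.pyGet? arr i).getD 0)) < fuel := by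
          have := pvFree_add_lt arr v _ hg1.1 hg1.2.1 hg1.2.2; omega
        have hsub1 := dfsGoA_mono arr fuel
          (PySem.Set.add v (i + (PySem.List.pyGet? arr i).getD 0))
          (i + (PySem.List.pyGet? arr i).getD 0)
        by_cases hg2 : 0 ≤ i - (PySem.List.pyGet? arr i).getD 0 ∧
            i - (PySem.List.pyGet? arr i).getD 0 < (arr.length : Int) ∧
            ¬ (i - (PySem.List.pyGet? arr i).getD 0) ∈ (dfsGoA arr fuel
              (PySem.Set.add v (i + (PySem.List.pyGet? arr i).getD 0))
              (i + (PySem.List.pyGet? arr i).getD 0)).2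
        · rw [if_pos hg2] at hres hk ⊢
          simp only [Bool.or_eq_false_iff] at hres
          have hf2 : pvFree arr (PySem.Set.add (dfsGoA arr fuel
              (PySem.Set.add v (i + (PySem.List.pyGet? arr i).getD 0))
              (i + (PySem.List.pyGet? arr i).getD 0)).2
              (i - (PySem.List.pyGet? arr i).getD 0)) < fuel := by
            have h1 := pvFree_add_lt arr _ _ hg2.1 hg2.2.1 hg2.2.2
            have h2 := pvFree_le_of_subset arr hsub1
            have h3 := pvFree_add_lt arr v _ hg1.1 hg1.2.1 hg1.2.2
            omega
          have hsub2 := dfsGoA_mono arr fuel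
            (PySem.Set.add (dfsGoA arr fuel
              (PySem.Set.add v (i + (PySem.List.pyGet? arr i).getD 0))
              (i + (PySem.List.pyGet? arr i).getD 0)).2
              (i - (PySem.List.pyGet? arr i).getD 0))
            (i - (PySem.List.pyGet? arr i).getD 0)
          have IH1 := ih _ _ hf1 hg1.2.1 hres.1
          have IH2 := ih _ _ hf2 hg2.2.1 hres.2
          -- lift a membership in the first call's set into the final set
          have lift1 : ∀ x, x ∈ (dfsGoA arr fuel
              (PySem.Set.add v (i + (PySem.List.pyGet? arr i).getD 0))
              (i + (PySem.List.pyGet? arr i).getD 0)).2 →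
              x ∈ (dfsGoA arr fuel (PySem.Set.add (dfsGoA arr fuel
                (PySem.Set.add v (i + (PySem.List.pyGet? arr i).getD 0))
                (i + (PySem.List.pyGet? arr i).getD 0)).2
                (i - (PySem.List.pyGet? arr i).getD 0))
                (i - (PySem.List.pyGet? arr i).getD 0)).2 :=
            fun x hx => hsub2 x (by simp [PySem.Set.mem_add, hx])
          rcases hk with rfl | ⟨hk2, hkv⟩
          · refine ⟨hz, ?_⟩
            rintro m ⟨⟨hm0, hml⟩, rfl | rfl⟩ <;> simp only [pvVal] at hm0 hml ⊢
            · exact lift1 _ (hsub1 _ (by simp [PySem.Set.mem_add]))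
            · exact hsub2 _ (by simp [PySem.Set.mem_add])
          · by_cases hk1 : k ∈ (dfsGoA arr fuel
                (PySem.Set.add v (i + (PySem.List.pyGet? arr i).getD 0))
                (i + (PySem.List.pyGet? arr i).getD 0)).2
            · by_cases hkn1 : k = i + (PySem.List.pyGet? arr i).getD 0
              · obtain ⟨hzk, hadj⟩ := IH1 k (Or.inl hkn1)
                exact ⟨hzk, fun m hm => lift1 _ (hadj m hm)⟩
              · obtain ⟨hzk, hadj⟩ := IH1 k (Or.inr ⟨hk1, by
                  simp [PySem.Set.mem_add, hkv, hkn1]⟩)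
                exact ⟨hzk, fun m hm => lift1 _ (hadj m hm)⟩
            · by_cases hkn2 : k = i - (PySem.List.pyGet? arr i).getD 0
              · exact IH2 k (Or.inl hkn2)
              · exact IH2 k (Or.inr ⟨hk2, by simp [PySem.Set.mem_add, hk1, hkn2]⟩)
        · rw [if_neg hg2] at hres hk ⊢
          simp only [Bool.or_false] at hres
          have IH1 := ih _ _ hf1 hg1.2.1 hres
          rcases hk with rfl | ⟨hk1, hkv⟩
          · refine ⟨hz, ?_⟩
            rintro m ⟨⟨hm0, hml⟩, rfl | rfl⟩ <;> simp only [pvVal] at hm0 hml ⊢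
            · exact hsub1 _ (by simp [PySem.Set.mem_add])
            · -- the second neighbour was already visited (the guard failed in range)
              push_neg at hg2
              exact not_not.mp (by simpa using hg2 hm0 hml)
          · by_cases hkn1 : k = i + (PySem.List.pyGet? arr i).getD 0
            · exact IH1 k (Or.inl hkn1)
            · exact IH1 k (Or.inr ⟨hk1, by simp [PySem.Set.mem_add, hkv, hkn1]⟩)
      · rw [if_neg hg1] at hres hk ⊢
        by_cases hg2 : 0 ≤ i - (PySem.List.pyGet? arr i).getD 0 ∧
            i - (PySem.List.pyGet? arr i).getD 0 < (arr.length : Int) ∧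
            ¬ (i - (PySem.List.pyGet? arr i).getD 0) ∈ v
        · rw [if_pos hg2] at hres hk ⊢
          simp only [Bool.false_or] at hres
          have hf2 : pvFree arr (PySem.Set.add v (i - (PySem.List.pyGet? arr i).getD 0)) < fuel := by
            have := pvFree_add_lt arr v _ hg2.1 hg2.2.1 hg2.2.2; omega
          have hsub2 := dfsGoA_mono arr fuel
            (PySem.Set.add v (i - (PySem.List.pyGet? arr i).getD 0))
            (i - (PySem.List.pyGet? arr i).getD 0)
          have IH2 := ih _ _ hf2 hg2.2.1 hres
          rcases hk with rfl | ⟨hk2, hkv⟩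
          · refine ⟨hz, ?_⟩
            rintro m ⟨⟨hm0, hml⟩, rfl | rfl⟩ <;> simp only [pvVal] at hm0 hml ⊢
            · -- first neighbour already visited (its guard failed though in range)
              push_neg at hg1
              exact hsub2 _ (by simp [PySem.Set.mem_add,
                not_not.mp (by simpa using hg1 hm0 hml)])
            · exact hsub2 _ (by simp [PySem.Set.mem_add])
          · by_cases hkn2 : k = i - (PySem.List.pyGet? arr i).getD 0
            · exact IH2 k (Or.inl hkn2)
            · exact IH2 k (Or.inr ⟨hk2, by simp [PySem.Set.mem_add, hkv, hkn2]⟩)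
        · rw [if_neg hg2] at hres hk ⊢
          rcases hk with rfl | ⟨hk2, hkv⟩
          · refine ⟨hz, ?_⟩
            rintro m ⟨⟨hm0, hml⟩, rfl | rfl⟩ <;> simp only [pvVal] at hm0 hml ⊢
            · push_neg at hg1
              exact not_not.mp (by simpa using hg1 hm0 hml)
            · push_neg at hg2
              exact not_not.mp (by simpa using hg2 hm0 hml)
          · exact absurd hk2 hkv

theorem dfsGoB_sound (arr : List Int) :
    ∀ (v : PySem.Set Int) (stack : List Int), dfsGoB arr v stack = true →
      ∃ i ∈ stack, ∃ j, Relation.ReflTransGen (pvStep arr) i j ∧ pvVal arr j = 0 := by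
  intro v stack
  induction v, stack using dfsGoB.induct arr with
  | case1 v => intro h; simp [dfsGoB] at h
  | case2 v i rest hz =>
    intro _
    exact ⟨i, by simp, i, Relation.ReflTransGen.refl, hz⟩
  | case3 v i rest hz h1 h2 ih =>
    intro h
    rw [dfsGoB] at h
    rw [if_neg hz, dif_pos h1, dif_pos h2] at h
    rcases ih h with ⟨i', hi', j, hj, hj0⟩
    rcases List.mem_cons.mp hi' with rfl | hi'
    · exact ⟨i, by simp, j,
        Relation.ReflTransGen.head ⟨hz, ⟨⟨h2.1, h2.2.1⟩, Or.inr rfl⟩⟩ hj, hj0⟩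
    · rcases List.mem_cons.mp hi' with rfl | hi'
      · exact ⟨i, by simp, j,
          Relation.ReflTransGen.head ⟨hz, ⟨⟨h1.1, h1.2.1⟩, Or.inl rfl⟩⟩ hj, hj0⟩
      · exact ⟨i', by simp [hi'], j, hj, hj0⟩
  | case4 v i rest hz h1 h2 ih =>
    intro h
    rw [dfsGoB] at h
    rw [if_neg hz, dif_pos h1, dif_neg h2] at h
    rcases ih h with ⟨i', hi', j, hj, hj0⟩
    rcases List.mem_cons.mp hi' with rfl | hi'
    · exact ⟨i, by simp, j,
        Relation.ReflTransGen.head ⟨hz, ⟨⟨h1.1, h1.2.1⟩, Or.inl rfl⟩⟩ hj, hj0⟩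
    · exact ⟨i', by simp [hi'], j, hj, hj0⟩
  | case5 v i rest hz h1 h2 ih =>
    intro h
    rw [dfsGoB] at h
    rw [if_neg hz, dif_neg h1, dif_pos h2] at h
    rcases ih h with ⟨i', hi', j, hj, hj0⟩
    rcases List.mem_cons.mp hi' with rfl | hi'
    · exact ⟨i, by simp, j,
        Relation.ReflTransGen.head ⟨hz, ⟨⟨h2.1, h2.2.1⟩, Or.inr rfl⟩⟩ hj, hj0⟩
    · exact ⟨i', by simp [hi'], j, hj, hj0⟩
  | case6 v i rest hz h1 h2 ih =>
    intro h
    rw [dfsGoB] at h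
    rw [if_neg hz, dif_neg h1, dif_neg h2] at h
    rcases ih h with ⟨i', hi', j, hj, hj0⟩
    exact ⟨i', by simp [hi'], j, hj, hj0⟩

theorem dfsGoB_comp (arr : List Int) :
    ∀ (v : PySem.Set Int) (stack : List Int), dfsGoB arr v stack = false →
      (∀ k ∈ v, ¬ k ∈ stack → pvVal arr k ≠ 0 ∧ ∀ m, pvAdj arr k m → m ∈ v) →
      ∀ x, (x ∈ v ∨ x ∈ stack) →
      ∀ j, Relation.ReflTransGen (pvStep arr) x j → pvVal arr j ≠ 0 := by
  intro v stack
  induction v, stack using dfsGoB.induct arr with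
  | case1 v =>
    intro _ hInv x hx j hj
    have hxv : x ∈ v := by simpa using hx
    have hmem : j ∈ v := by
      induction hj with
      | refl => exact hxv
      | tail hab hbc ihm => exact ((hInv _ ihm (by simp)).2 _ hbc.2)
    exact (hInv _ hmem (by simp)).1
  | case2 v i rest hz =>
    intro h
    rw [dfsGoB] at h
    rw [if_pos hz] at h
    simp at h
  | case3 v i rest hz h1 h2 ih =>
    intro h hInv
    rw [dfsGoB] at h
    rw [if_neg hz, dif_pos h1, dif_pos h2] at h
    have hInv' : ∀ k ∈ (PySem.Set.add (PySem.Set.add v (i + (PySem.List.pyGet? arr i).getD 0))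
        (i - (PySem.List.pyGet? arr i).getD 0)),
        ¬ k ∈ ((i - (PySem.List.pyGet? arr i).getD 0) ::
          (i + (PySem.List.pyGet? arr i).getD 0) :: rest) →
        pvVal arr k ≠ 0 ∧ ∀ m, pvAdj arr k m →
          m ∈ (PySem.Set.add (PySem.Set.add v (i + (PySem.List.pyGet? arr i).getD 0))
            (i - (PySem.List.pyGet? arr i).getD 0)) := by
      intro k hk hks
      simp only [List.mem_cons, not_or] at hks
      have hkv : k ∈ v := by
        simp only [PySem.Set.mem_add] at hk
        rcases hks with ⟨hks1, hks2, _⟩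
        tauto
      by_cases hki : k = i
      · subst hki
        refine ⟨hz, ?_⟩
        rintro m ⟨⟨hm0, hml⟩, rfl | rfl⟩ <;> simp [pvVal, PySem.Set.mem_add]
      · obtain ⟨hne, hadj⟩ := hInv k hkv (by simp [hki, hks.2.2])
        exact ⟨hne, fun m hm => by simp [PySem.Set.mem_add, hadj m hm]⟩
    have key := ih h hInv'
    intro x hx j hj
    rcases hx with hxv | hxs
    · exact key x (Or.inl (by simp [PySem.Set.mem_add, hxv])) j hj
    · rcases List.mem_cons.mp hxs with rfl | hxr
      · rcases (Relation.ReflTransGen.cases_head hj) with rfl | ⟨m, hstep, hj'⟩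
        · exact hz
        · obtain ⟨_, ⟨hmr, hm⟩⟩ := hstep
          rcases hm with rfl | rfl
          · exact key _ (Or.inl (by simp [pvVal, PySem.Set.mem_add])) j hj'
          · exact key _ (Or.inl (by simp [pvVal, PySem.Set.mem_add])) j hj'
      · exact key x (Or.inr (by simp [hxr])) j hj
  | case4 v i rest hz h1 h2 ih =>
    intro h hInv
    rw [dfsGoB] at h
    rw [if_neg hz, dif_pos h1, dif_neg h2] at h
    push_neg at h2
    have hInv' : ∀ k ∈ (PySem.Set.add v (i + (PySem.List.pyGet? arr i).getD 0)),
        ¬ k ∈ ((i + (PySem.List.pyGet? arr i).getD 0) :: rest) →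
        pvVal arr k ≠ 0 ∧ ∀ m, pvAdj arr k m →
          m ∈ (PySem.Set.add v (i + (PySem.List.pyGet? arr i).getD 0)) := by
      intro k hk hks
      simp only [List.mem_cons, not_or] at hks
      have hkv : k ∈ v := by
        simp only [PySem.Set.mem_add] at hk
        rcases hks with ⟨hks1, _⟩
        tauto
      by_cases hki : k = i
      · subst hki
        refine ⟨hz, ?_⟩
        rintro m ⟨⟨hm0, hml⟩, rfl | rfl⟩ <;> simp only [pvVal] at hm0 hml ⊢
        · simp [PySem.Set.mem_add]
        · have := not_not.mp (by simpa using h2 hm0 hml)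
          simp [PySem.Set.mem_add, this]
      · obtain ⟨hne, hadj⟩ := hInv k hkv (by simp [hki, hks.2])
        exact ⟨hne, fun m hm => by simp [PySem.Set.mem_add, hadj m hm]⟩
    have key := ih h hInv'
    intro x hx j hj
    rcases hx with hxv | hxs
    · exact key x (Or.inl (by simp [PySem.Set.mem_add, hxv])) j hj
    · rcases List.mem_cons.mp hxs with rfl | hxr
      · rcases (Relation.ReflTransGen.cases_head hj) with rfl | ⟨m, hstep, hj'⟩
        · exact hz
        · obtain ⟨_, ⟨hmr, hm⟩⟩ := hstep
          rcases hm with rfl | rfl <;>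
            simp only [pvVal] at hmr hj' ⊢
          · exact key _ (Or.inl (by simp [PySem.Set.mem_add])) j hj'
          · have := not_not.mp (by simpa using h2 hmr.1 hmr.2)
            exact key _ (Or.inl (by simp [PySem.Set.mem_add, this])) j hj'
      · exact key x (Or.inr (by simp [hxr])) j hj
  | case5 v i rest hz h1 h2 ih =>
    intro h hInv
    rw [dfsGoB] at h
    rw [if_neg hz, dif_neg h1, dif_pos h2] at h
    push_neg at h1
    have hInv' : ∀ k ∈ (PySem.Set.add v (i - (PySem.List.pyGet? arr i).getD 0)),
        ¬ k ∈ ((i - (PySem.List.pyGet? arr i).getD 0) :: rest) →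
        pvVal arr k ≠ 0 ∧ ∀ m, pvAdj arr k m →
          m ∈ (PySem.Set.add v (i - (PySem.List.pyGet? arr i).getD 0)) := by
      intro k hk hks
      simp only [List.mem_cons, not_or] at hks
      have hkv : k ∈ v := by
        simp only [PySem.Set.mem_add] at hk
        rcases hks with ⟨hks1, _⟩
        tauto
      by_cases hki : k = i
      · subst hki
        refine ⟨hz, ?_⟩
        rintro m ⟨⟨hm0, hml⟩, rfl | rfl⟩ <;> simp only [pvVal] at hm0 hml ⊢
        · have := not_not.mp (by simpa using h1 hm0 hml)
          simp [PySem.Set.mem_add, this]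
        · simp [PySem.Set.mem_add]
      · obtain ⟨hne, hadj⟩ := hInv k hkv (by simp [hki, hks.2])
        exact ⟨hne, fun m hm => by simp [PySem.Set.mem_add, hadj m hm]⟩
    have key := ih h hInv'
    intro x hx j hj
    rcases hx with hxv | hxs
    · exact key x (Or.inl (by simp [PySem.Set.mem_add, hxv])) j hj
    · rcases List.mem_cons.mp hxs with rfl | hxr
      · rcases (Relation.ReflTransGen.cases_head hj) with rfl | ⟨m, hstep, hj'⟩
        · exact hz
        · obtain ⟨_, ⟨hmr, hm⟩⟩ := hstep
          rcases hm with rfl | rfl <;>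
            simp only [pvVal] at hmr hj' ⊢
          · have := not_not.mp (by simpa using h1 hmr.1 hmr.2)
            exact key _ (Or.inl (by simp [PySem.Set.mem_add, this])) j hj'
          · exact key _ (Or.inl (by simp [PySem.Set.mem_add])) j hj'
      · exact key x (Or.inr (by simp [hxr])) j hj
  | case6 v i rest hz h1 h2 ih =>
    intro h hInv
    rw [dfsGoB] at h
    rw [if_neg hz, dif_neg h1, dif_neg h2] at h
    push_neg at h1
    push_neg at h2
    have hInv' : ∀ k ∈ v, ¬ k ∈ rest →
        pvVal arr k ≠ 0 ∧ ∀ m, pvAdj arr k m → m ∈ v := by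
      intro k hk hks
      by_cases hki : k = i
      · subst hki
        refine ⟨hz, ?_⟩
        rintro m ⟨⟨hm0, hml⟩, rfl | rfl⟩ <;> simp only [pvVal] at hm0 hml ⊢
        · exact not_not.mp (by simpa using h1 hm0 hml)
        · exact not_not.mp (by simpa using h2 hm0 hml)
      · exact hInv k hk (by simp [hki, hks])
    have key := ih h hInv'
    intro x hx j hj
    rcases hx with hxv | hxs
    · exact key x (Or.inl hxv) j hj
    · rcases List.mem_cons.mp hxs with rfl | hxr
      · rcases (Relation.ReflTransGen.cases_head hj) with rfl | ⟨m, hstep, hj'⟩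
        · exact hz
        · obtain ⟨_, ⟨hmr, hm⟩⟩ := hstep
          rcases hm with rfl | rfl <;>
            simp only [pvVal] at hmr hj' ⊢
          · have := not_not.mp (by simpa using h1 hmr.1 hmr.2)
            exact key _ (Or.inl this) j hj'
          · have := not_not.mp (by simpa using h2 hmr.1 hmr.2)
            exact key _ (Or.inl this) j hj'
      · exact key x (Or.inr hxr) j hj

theorem dfs_char (arr : List Int) (start : Int) (h : start < (arr.length : Int)) :
    dfs arr start = true ↔
      ∃ j, Relation.ReflTransGen (pvStep arr) start j ∧ pvVal arr j = 0 := by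
  constructor
  · intro ht
    exact dfsGoA_sound arr (arr.length + 1) PySem.Set.empty start ht
  · rintro ⟨j, hj, hj0⟩
    by_contra hne
    have hb : (dfsGoA arr (arr.length + 1) PySem.Set.empty start).1 = false := by
      revert hne; unfold dfs; cases (dfsGoA arr (arr.length + 1) PySem.Set.empty start).1 <;>
        simp
    have hfu : pvFree arr PySem.Set.empty < arr.length + 1 := by
      rw [pvFree_empty]; omega
    have hinv := dfsGoA_inv arr (arr.length + 1) PySem.Set.empty start hfu h hb
    have hcl : ∀ x, Relation.ReflTransGen (pvStep arr) start x →
        (x = start ∨ x ∈ (dfsGoA arr (arr.length + 1) PySem.Set.empty start).2) := by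
      intro x hx
      induction hx with
      | refl => exact Or.inl rfl
      | tail hab hbc ihm =>
        refine Or.inr ?_
        rcases ihm with rfl | hbmem
        · exact (hinv _ (Or.inl rfl)).2 _ hbc.2
        · exact (hinv _ (Or.inr ⟨hbmem, by simp [PySem.Set.empty]⟩)).2 _ hbc.2
    rcases hcl j hj with rfl | hjmem
    · exact (hinv _ (Or.inl rfl)).1 hj0
    · exact (hinv _ (Or.inr ⟨hjmem, by simp [PySem.Set.empty]⟩)).1 hj0

theorem dfs_alt_char (arr : List Int) (start : Int) (h : start < (arr.length : Int)) :
    dfs_alt arr start = true ↔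
      ∃ j, Relation.ReflTransGen (pvStep arr) start j ∧ pvVal arr j = 0 := by
  have halt : dfs_alt arr start = dfsGoB arr PySem.Set.empty [start] := by
    unfold dfs_alt; rw [if_neg (not_not_intro h)]
  rw [halt]
  constructor
  · intro ht
    rcases dfsGoB_sound arr PySem.Set.empty [start] ht with ⟨i, hi, j, hj, hj0⟩
    rcases List.mem_singleton.mp hi with rfl
    exact ⟨j, hj, hj0⟩
  · rintro ⟨j, hj, hj0⟩
    by_contra hne
    have hb : dfsGoB arr PySem.Set.empty [start] = false := by
      revert hne; cases dfsGoB arr PySem.Set.empty [start] <;> simp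
    have hcomp := dfsGoB_comp arr PySem.Set.empty [start] hb
      (by intro k hk; simp [PySem.Set.empty] at hk)
    exact hcomp start (Or.inr (by simp)) j hj hj0

-- ===== VERDICT (by name: the statement is the Claim_ definition above) =====
theorem dfs_spec : Claim_equal_dfs := by
  intro arr start _ _
  unfold Spec_dfs
  by_cases h : start < (arr.length : Int)
  · rw [Bool.eq_iff_iff, dfs_char arr start h, dfs_alt_char arr start h]
  · have hA : dfs arr start = false := by
      simp [dfs, dfsGoA, h]
    have hB : dfs_alt arr start = false := by
      simp [dfs_alt, h]
    rw [hA, hB]
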